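-- pv_equiv track=rewrite | github.com/jllaneras/aoc-2019 | 4/star8.py | has_double_digit
-- ===== SOURCE A (Python) =====
-- def has_double_digit(password):
--     result = False
--     last_char = None
--     num_repetitions = None
--
--     for char in password:
--         if char == last_char:
--             num_repetitions += 1
--         elif num_repetitions == 2:
--             break
--         else:
--             num_repetitions = 1
--
--         last_char = char
--
--     if num_repetitions == 2:
--         result = True
--
--     return result
-- ===== SOURCE B (Python) =====
-- def has_double_digit(password):
--     chars = list(password)
--     while chars:
--         run = 1
--         while run < len(chars) and chars[run] == chars[0]:
--             run += 1
--         if run == 2: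
--             return True
--         chars = chars[run:]
--     return False
-- ===== Notes on version B (the rewrite author's own statement) =====
-- stated objective: alternative
-- what changed: Replaces A's char-by-char scan with last_char/num_repetitions state and an early break by a run-skipping loop: each iteration measures the length of the leading maximal run with an inner pointer, returns True if it is exactly 2, and otherwise drops the whole run.
import Mathlib
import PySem

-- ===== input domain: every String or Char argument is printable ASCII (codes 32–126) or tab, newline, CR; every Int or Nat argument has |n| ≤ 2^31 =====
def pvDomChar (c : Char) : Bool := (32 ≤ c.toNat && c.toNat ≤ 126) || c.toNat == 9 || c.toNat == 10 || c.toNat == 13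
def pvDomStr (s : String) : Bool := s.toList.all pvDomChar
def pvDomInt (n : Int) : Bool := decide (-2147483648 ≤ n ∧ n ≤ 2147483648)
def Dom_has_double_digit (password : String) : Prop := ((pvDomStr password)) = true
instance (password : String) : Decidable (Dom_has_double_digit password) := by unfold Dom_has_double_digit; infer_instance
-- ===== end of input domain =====

-- B replaces A's streaming last_char/num_repetitions scan by a run-skipping two-pointer loop over maximal runs (alternative decomposition; return value only).

-- ===== PORT A =====
-- A's loop state: last_char : Option Char, num_repetitions : Option Int; the `break` is the
-- early return of n. `n.getD 0 + 1` ports `num_repetitions += 1`, reached only when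
-- `some c == last`, i.e. after an iteration that set num_repetitions (so n is never None there).
def goA : List Char → Option Char → Option Int → Option Int
  | [], _, n => n
  | c :: cs, last, n =>
    if some c == last then goA cs (some c) (some (n.getD 0 + 1))
    else if n == some 2 then n          -- break
    else goA cs (some c) (some 1)

def has_double_digit (password : String) : Bool :=
  goA password.toList none none == some 2

-- ===== PORT B =====
-- B's outer while loop as tail recursion on the shrinking `chars`: the inner while computing
-- `run` is 1 + length of the leading run (takeWhile), `chars[run:]` is the rest (dropWhile),
-- `return True` is the then-branch, falling off the loop is `false`.
def altGo : List Char → Bool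
  | [] => false
  | c :: cs =>
    if 1 + (cs.takeWhile (fun x => x == c)).length == 2 then true
    else altGo (cs.dropWhile (fun x => x == c))
termination_by cs => cs.length
decreasing_by
  have := List.length_dropWhile_le (fun x => x == c) cs
  simp at *; omega

def has_double_digit_alt (password : String) : Bool :=
  altGo password.toList

-- ===== PRECONDITION & SPEC =====
def Spec_has_double_digit (password : String) (out : Bool) : Prop := out = has_double_digit_alt password
instance (password : String) (out : Bool) : Decidable (Spec_has_double_digit password out) := by unfold Spec_has_double_digit; infer_instance

-- ===== CLAIM (what is proved, stated in full; the proofs are below) =====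
def Claim_equal_has_double_digit : Prop := ∀ (password : String), Dom_has_double_digit password → Spec_has_double_digit password (has_double_digit password)

-- ===== LEMMAS AND PROOFS =====

-- Running A's loop inside a run: it finishes the current run (length k + takeWhile) and
-- either stops with 2, ends, or restarts with count 1 at the first differing char.
lemma goA_run (c : Char) : ∀ (cs : List Char) (k : Int),
    (goA cs (some c) (some k) == some 2) =
    ((k + ((cs.takeWhile (fun x => x == c)).length : Int) == 2) ||
      (match cs.dropWhile (fun x => x == c) with
       | [] => false
       | c'' :: cs'' => goA cs'' (some c'') (some 1) == some 2)) := by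
  intro cs
  induction cs with
  | nil => intro k; simp [goA]
  | cons c' cs' ih =>
    intro k
    by_cases h : c' = c
    · subst h
      simp only [goA, List.takeWhile_cons, List.dropWhile_cons, beq_self_eq_true, if_pos,
        Option.getD_some, ih (k + 1)]
      congr 1
      have h3 : k + 1 + ((cs'.takeWhile (fun x => x == c')).length : Int)
          = k + (((cs'.takeWhile (fun x => x == c')).length : Int) + 1) := by ring
      simp only [List.length_cons]
      push_cast
      rw [h3]
    · by_cases hk : k = 2
      · subst hk
        simp [goA, h]
      · have hks : (some k == some (2 : Int)) = false := by simp [hk]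
        simp [goA, h, hks, hk]

lemma main_bounded : ∀ (n : Nat) (cs : List Char), cs.length ≤ n →
    (goA cs none none == some 2) = altGo cs := by
  intro n
  induction n with
  | zero =>
    intro cs h
    cases cs with
    | nil => simp [goA, altGo]
    | cons a b => exact absurd h (by simp)
  | succ n ih =>
    intro cs h
    cases cs with
    | nil => simp [goA, altGo]
    | cons c cs =>
      have h1 : (goA (c :: cs) none none) = goA cs (some c) (some 1) := by
        simp [goA]
      rw [h1, goA_run, altGo]
      rcases eq_or_ne (List.takeWhile (fun x => x == c) cs).length 1 with hl | hl
      · simp [hl]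
      have hA : (1 + ((List.takeWhile (fun x => x == c) cs).length : Int) == 2) = false := by
        simp only [beq_eq_false_iff_ne, ne_eq]; omega
      have hB : (1 + (List.takeWhile (fun x => x == c) cs).length == 2) = false := by
        simp only [beq_eq_false_iff_ne, ne_eq]; omega
      rw [hA, hB]
      simp only [Bool.false_or, Bool.false_eq_true, if_false]
      cases hdrop : cs.dropWhile (fun x => x == c) with
        | nil => simp [altGo]
        | cons c'' cs'' =>
          have h2 : goA cs'' (some c'') (some 1) = goA (c'' :: cs'') none none := by
            simp [goA]
          have hlen : (c'' :: cs'').length ≤ n := by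
            have := List.length_dropWhile_le (fun x => x == c) cs
            rw [hdrop] at this
            simp at h
            simpa using Nat.le_trans this h
          show (goA cs'' (some c'') (some 1) == some 2) = altGo (c'' :: cs'')
          rw [h2]
          exact ih _ hlen

-- ===== VERDICT (by name: the statement is the Claim_ definition above) =====
theorem has_double_digit_spec : Claim_equal_has_double_digit := by
  intro password _
  unfold Spec_has_double_digit has_double_digit has_double_digit_alt
  exact main_bounded password.toList.length password.toList le_rfl
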